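-- pv_equiv track=rewrite | github.com/GovConY/govcon-agent | main.py | _best_naics_prefix_length
-- ===== SOURCE A (Python) =====
-- def _best_naics_prefix_length(naics_code: str, requested_codes: set[str]) -> int:
--     best = 0
--     for requested in requested_codes:
--         max_length = min(len(naics_code), len(requested))
--         current = 0
--         while current < max_length and naics_code[current] == requested[current]:
--             current += 1
--         if current > best:
--             best = current
--     return best if best >= 2 else 0
-- ===== SOURCE B (Python) =====
-- def _best_naics_prefix_length(naics_code: str, requested_codes: set[str]) -> int:
--     # Binary search the largest L such that some requested code starts with
--     # naics_code[:L] (the predicate is monotone in L), then apply the >=2 threshold.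
--     lo, hi = 0, len(naics_code)
--     while lo < hi:
--         mid = (lo + hi + 1) // 2
--         if any(r.startswith(naics_code[:mid]) for r in requested_codes):
--             lo = mid
--         else:
--             hi = mid - 1
--     return lo if lo >= 2 else 0
-- ===== Notes on version B (the rewrite author's own statement) =====
-- stated objective: alternative
-- what changed: B binary-searches the largest prefix length L for which any(r.startswith(naics_code[:L])) holds (the predicate is monotone in L), instead of A's per-code char-by-char while loop with a running best; the >=2 threshold is applied once at the end.
import Mathlib
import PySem

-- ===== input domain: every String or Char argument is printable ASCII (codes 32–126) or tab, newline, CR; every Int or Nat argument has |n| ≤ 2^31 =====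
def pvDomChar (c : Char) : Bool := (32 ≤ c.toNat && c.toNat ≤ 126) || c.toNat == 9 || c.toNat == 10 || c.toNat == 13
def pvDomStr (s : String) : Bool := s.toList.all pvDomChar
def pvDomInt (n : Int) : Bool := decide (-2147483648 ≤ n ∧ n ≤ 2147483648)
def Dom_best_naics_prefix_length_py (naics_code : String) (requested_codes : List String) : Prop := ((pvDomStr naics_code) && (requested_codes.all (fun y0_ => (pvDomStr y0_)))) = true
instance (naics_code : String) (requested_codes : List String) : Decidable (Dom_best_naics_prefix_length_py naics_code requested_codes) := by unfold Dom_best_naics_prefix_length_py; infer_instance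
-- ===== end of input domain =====

-- B binary-searches the largest prefix length L with any(r.startswith(naics_code[:L])) — a monotone predicate — instead of A's per-code char scan with a running best (alternative algorithm).


-- ===== PORT A =====
-- A's inner while loop: advance `cur` while cur < maxLen and the characters agree.
def pvWhileA (a b : List Char) (maxLen cur : Nat) : Nat :=
  if cur < maxLen ∧ a.getD cur ' ' = b.getD cur ' ' then
    pvWhileA a b maxLen (cur + 1)
  else cur
termination_by maxLen - cur

def best_naics_prefix_length_py (naics_code : String) (requested_codes : List String) : Int :=
  let best := requested_codes.foldl
    (fun best requested =>
      let maxLen := min naics_code.toList.length requested.toList.length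
      let current := pvWhileA naics_code.toList requested.toList maxLen 0
      if current > best then current else best) 0
  if best ≥ 2 then (best : Int) else 0

-- ===== PORT B =====
-- B's while loop: binary search lo..hi for the largest L with a startswith hit.
def pvBsearchB (naics_code : String) (requested_codes : List String) (lo hi : Nat) : Nat :=
  if lo < hi then
    let mid := (lo + hi + 1) / 2
    if requested_codes.any (fun r => PySem.Str.startswith r (String.ofList (naics_code.toList.take mid))) then
      pvBsearchB naics_code requested_codes mid hi
    else
      pvBsearchB naics_code requested_codes lo (mid - 1)
  else lo
termination_by hi - lo
decreasing_by all_goals omega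

def best_naics_prefix_length_py_alt (naics_code : String) (requested_codes : List String) : Int :=
  let lo := pvBsearchB naics_code requested_codes 0 naics_code.toList.length
  if lo ≥ 2 then (lo : Int) else 0

-- ===== PRECONDITION & SPEC =====
def Spec_best_naics_prefix_length_py (naics_code : String) (requested_codes : List String) (out : Int) : Prop := out = best_naics_prefix_length_py_alt naics_code requested_codes
instance (naics_code : String) (requested_codes : List String) (out : Int) : Decidable (Spec_best_naics_prefix_length_py naics_code requested_codes out) := by unfold Spec_best_naics_prefix_length_py; infer_instance

-- ===== CLAIM (what is proved, stated in full; the proofs are below) =====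
def Claim_equal_best_naics_prefix_length_py : Prop := ∀ (naics_code : String) (requested_codes : List String), Dom_best_naics_prefix_length_py naics_code requested_codes → Spec_best_naics_prefix_length_py naics_code requested_codes (best_naics_prefix_length_py naics_code requested_codes)

-- ===== LEMMAS AND PROOFS =====

-- length of the longest common prefix of two char lists
def pvLcp : List Char → List Char → Nat
  | x :: xs, y :: ys => if x = y then pvLcp xs ys + 1 else 0
  | _, _ => 0

theorem pvLcp_le_left : ∀ (a b : List Char), pvLcp a b ≤ a.length := by
  intro a
  induction a with
  | nil => intro b; simp [pvLcp]
  | cons x xs ih =>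
    intro b
    cases b with
    | nil => simp [pvLcp]
    | cons y ys =>
      simp only [pvLcp]
      split
      · have := ih ys; simp; omega
      · simp

theorem pvWhileA_eq_lcp (a b : List Char) :
    ∀ cur, pvWhileA a b (min a.length b.length) cur = cur + pvLcp (a.drop cur) (b.drop cur) := by
  intro cur
  have hterm : ∀ n cur, min a.length b.length - cur ≤ n →
      pvWhileA a b (min a.length b.length) cur = cur + pvLcp (a.drop cur) (b.drop cur) := by
    intro n
    induction n with
    | zero =>
      intro cur h
      have hcur : ¬ cur < min a.length b.length := by omega
      rw [pvWhileA]
      simp only [hcur, false_and, if_false]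
      have : a.drop cur = [] ∨ b.drop cur = [] := by
        rcases Nat.lt_or_ge cur a.length with h1 | h1
        · right; apply List.drop_eq_nil_of_le; omega
        · left; apply List.drop_eq_nil_of_le; omega
      rcases this with h1 | h1
      · rw [h1]; simp [pvLcp]
      · rw [h1]; cases a.drop cur <;> simp [pvLcp]
    | succ n ih =>
      intro cur h
      rw [pvWhileA]
      by_cases hcur : cur < min a.length b.length
      · have ha : cur < a.length := by omega
        have hb : cur < b.length := by omega
        have hda : a.drop cur = a[cur] :: a.drop (cur + 1) := List.drop_eq_getElem_cons ha
        have hdb : b.drop cur = b[cur] :: b.drop (cur + 1) := List.drop_eq_getElem_cons hb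
        by_cases heq : a.getD cur ' ' = b.getD cur ' '
        · simp only [hcur, heq, and_true, if_pos]
          rw [ih (cur + 1) (by omega)]
          rw [hda, hdb]
          have heq' : a[cur] = b[cur] := by
            rwa [List.getD_eq_getElem a ' ' ha, List.getD_eq_getElem b ' ' hb] at heq
          simp [pvLcp, heq']
          omega
        · simp only [hcur, heq, and_false, if_false]
          rw [hda, hdb]
          have heq' : ¬ a[cur] = b[cur] := by
            rw [List.getD_eq_getElem a ' ' ha, List.getD_eq_getElem b ' ' hb] at heq
            exact heq
          simp [pvLcp, heq']
      · simp only [hcur, false_and, if_false]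
        have : a.drop cur = [] ∨ b.drop cur = [] := by
          rcases Nat.lt_or_ge cur a.length with h1 | h1
          · right; apply List.drop_eq_nil_of_le; omega
          · left; apply List.drop_eq_nil_of_le; omega
        rcases this with h1 | h1
        · rw [h1]; simp [pvLcp]
        · rw [h1]; cases a.drop cur <;> simp [pvLcp]
  exact hterm _ cur (Nat.le_refl _)

-- take L a is a prefix of b iff L ≤ lcp a b (when L ≤ |a|)
theorem take_prefix_iff_lcp : ∀ (a b : List Char) (L : Nat), L ≤ a.length →
    (a.take L <+: b ↔ L ≤ pvLcp a b) := by
  intro a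
  induction a with
  | nil =>
    intro b L h
    have : L = 0 := by simpa using h
    subst this
    simp
  | cons x xs ih =>
    intro b L h
    cases L with
    | zero => simp
    | succ L =>
      cases b with
      | nil =>
        simp only [List.take_succ_cons, pvLcp]
        constructor
        · intro hp; exact absurd (List.eq_nil_of_prefix_nil hp) (by simp)
        · intro hle; cases xs <;> simp_all
      | cons y ys =>
        simp only [List.take_succ_cons, List.cons_prefix_cons, pvLcp]
        constructor
        · rintro ⟨hxy, hp⟩
          rw [if_pos hxy]
          have := (ih ys L (by simpa using h)).mp hp
          omega
        · intro hle
          by_cases hxy : x = y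
          · rw [if_pos hxy] at hle
            exact ⟨hxy, (ih ys L (by simpa using h)).mpr (by omega)⟩
          · rw [if_neg hxy] at hle; omega

-- the maximum of the lcp of naics with each requested code
def pvM (naics_code : String) (requested_codes : List String) : Nat :=
  (requested_codes.map (fun r => pvLcp naics_code.toList r.toList)).foldl max 0

theorem foldl_max_le_iff (l : List Nat) : ∀ (acc x : Nat),
    x ≤ l.foldl max acc ↔ x ≤ acc ∨ ∃ y ∈ l, x ≤ y := by
  induction l with
  | nil => intro acc x; simp
  | cons z zs ih =>
    intro acc x
    simp only [List.foldl_cons, ih, List.mem_cons, le_max_iff]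
    constructor
    · rintro ((h | h) | ⟨y, hy, hxy⟩)
      · exact Or.inl h
      · exact Or.inr ⟨z, Or.inl rfl, h⟩
      · exact Or.inr ⟨y, Or.inr hy, hxy⟩
    · rintro (h | ⟨y, rfl | hy, hxy⟩)
      · exact Or.inl (Or.inl h)
      · exact Or.inl (Or.inr hxy)
      · exact Or.inr ⟨y, hy, hxy⟩

theorem pvM_def (naics_code : String) (requested_codes : List String) :
    pvM naics_code requested_codes
    = (requested_codes.map (fun r => pvLcp naics_code.toList r.toList)).foldl max 0 := rfl

-- A's fold computes pvM
theorem foldA_eq_M_aux (naics_code : String) : ∀ (rs : List String) (acc : Nat),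
    rs.foldl
      (fun best requested =>
        let maxLen := min naics_code.toList.length requested.toList.length
        let current := pvWhileA naics_code.toList requested.toList maxLen 0
        if current > best then current else best) acc
    = (rs.map (fun r => pvLcp naics_code.toList r.toList)).foldl max acc := by
  intro rs
  induction rs with
  | nil => intro acc; simp
  | cons r rs ih =>
    intro acc
    simp only [List.foldl_cons, List.map_cons]
    rw [ih]
    congr 1
    have hw : pvWhileA naics_code.toList r.toList (min naics_code.toList.length r.toList.length) 0
        = pvLcp naics_code.toList r.toList := by
      have := pvWhileA_eq_lcp naics_code.toList r.toList 0
      simpa using this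
    simp only [hw]
    rcases Nat.lt_or_ge acc (pvLcp naics_code.toList r.toList) with h | h
    · rw [if_pos h, Nat.max_eq_right (by omega)]
    · rw [if_neg (by omega), Nat.max_eq_left h]

theorem pvM_le (naics_code : String) (requested_codes : List String) :
    pvM naics_code requested_codes ≤ naics_code.toList.length ∨ pvM naics_code requested_codes = 0 := by
  unfold pvM
  induction requested_codes with
  | nil => right; simp
  | cons r rs ih =>
    left
    have haux : ∀ (l : List Nat) (acc : Nat), (∀ y ∈ l, y ≤ naics_code.toList.length) →
        acc ≤ naics_code.toList.length → l.foldl max acc ≤ naics_code.toList.length := by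
      intro l
      induction l with
      | nil => intro acc _ h2; simpa using h2
      | cons z zs ih2 =>
        intro acc h1 h2
        simp only [List.foldl_cons]
        exact ih2 _ (fun y hy => h1 y (List.mem_cons_of_mem _ hy))
          (by have := h1 z (List.mem_cons_self ..); omega)
    apply haux
    · intro y hy
      simp only [List.mem_map] at hy
      obtain ⟨s, _, rfl⟩ := hy
      exact pvLcp_le_left _ _
    · exact Nat.zero_le _

-- the any(startswith) test at length mid (1 ≤ mid ≤ |naics|) holds iff mid ≤ pvM
theorem anyB_iff (naics_code : String) (requested_codes : List String) (mid : Nat)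
    (h1 : 1 ≤ mid) (hmid : mid ≤ naics_code.toList.length) :
    (requested_codes.any
        (fun r => PySem.Str.startswith r (String.ofList (naics_code.toList.take mid)))) = true
      ↔ mid ≤ pvM naics_code requested_codes := by
  rw [List.any_eq_true]
  constructor
  · rintro ⟨r, hr, hs⟩
    have hpre : naics_code.toList.take mid <+: r.toList :=
      (PySem.Chars.startswith_iff _ _).mp (by simpa [PySem.Str.startswith, String.toList_ofList] using hs)
    have hle : mid ≤ pvLcp naics_code.toList r.toList :=
      (take_prefix_iff_lcp _ _ _ hmid).mp hpre
    rw [pvM_def, foldl_max_le_iff]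
    right
    exact ⟨_, List.mem_map_of_mem hr, hle⟩
  · intro hle
    rw [pvM_def, foldl_max_le_iff] at hle
    rcases hle with h | ⟨y, hy, hxy⟩
    · omega
    · simp only [List.mem_map] at hy
      obtain ⟨r, hr, rfl⟩ := hy
      refine ⟨r, hr, ?_⟩
      simp only [PySem.Str.startswith]
      apply (PySem.Chars.startswith_iff _ _).mpr
      have := (take_prefix_iff_lcp naics_code.toList r.toList mid hmid).mpr hxy
      simpa [String.toList_ofList] using this

-- the binary search converges to pvM whenever lo ≤ pvM ≤ hi ≤ |naics|
theorem pvBsearchB_eq (naics_code : String) (requested_codes : List String) :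
    ∀ (lo hi : Nat), lo ≤ pvM naics_code requested_codes →
      pvM naics_code requested_codes ≤ hi → hi ≤ naics_code.toList.length →
      pvBsearchB naics_code requested_codes lo hi = pvM naics_code requested_codes := by
  have hterm : ∀ (n lo hi : Nat), hi - lo ≤ n → lo ≤ pvM naics_code requested_codes →
      pvM naics_code requested_codes ≤ hi → hi ≤ naics_code.toList.length →
      pvBsearchB naics_code requested_codes lo hi = pvM naics_code requested_codes := by
    intro n
    induction n with
    | zero =>
      intro lo hi h hlo hhi _
      rw [pvBsearchB]
      rw [if_neg (by omega)]
      omega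
    | succ n ih =>
      intro lo hi h hlo hhi hlen
      rw [pvBsearchB]
      by_cases hlt : lo < hi
      · rw [if_pos hlt]
        have hmid1 : 1 ≤ (lo + hi + 1) / 2 := by omega
        have hmid2 : (lo + hi + 1) / 2 ≤ hi := by omega
        have hiff := anyB_iff naics_code requested_codes ((lo + hi + 1) / 2) hmid1 (by omega)
        by_cases hm : (lo + hi + 1) / 2 ≤ pvM naics_code requested_codes
        · rw [if_pos (hiff.mpr hm)]
          exact ih _ _ (by omega) hm hhi hlen
        · rw [if_neg (by rw [hiff]; omega)]
          exact ih _ _ (by omega) hlo (by omega) (by omega)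
      · rw [if_neg hlt]
        omega
  intro lo hi
  exact hterm (hi - lo) lo hi (Nat.le_refl _)

-- ===== VERDICT (by name: the statement is the Claim_ definition above) =====
theorem best_naics_prefix_length_py_spec : Claim_equal_best_naics_prefix_length_py := by
  intro naics_code requested_codes _
  unfold Spec_best_naics_prefix_length_py best_naics_prefix_length_py best_naics_prefix_length_py_alt
  simp only
  rw [foldA_eq_M_aux, ← pvM_def]
  have hM : pvM naics_code requested_codes ≤ naics_code.toList.length := by
    rcases pvM_le naics_code requested_codes with h | h
    · exact h
    · omega
  rw [pvBsearchB_eq naics_code requested_codes 0 naics_code.toList.length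
    (Nat.zero_le _) hM (Nat.le_refl _)]
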